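-- pv_equiv track=rewrite | github.com/openalea-incubator/adel | adel/plantgen/tools.py | get_primary_axis
-- ===== SOURCE A (Python) =====
-- def get_primary_axis(id_axis, first_child_delay):
--     '''
--     Calculate the primary axis of *id_axis*.
--
--     :Parameters:
--
--         - `id_axis` (:class:`str`) - the botanical position of the axis.
--         - `first_child_delay` (:class:`int`) - the delay between the axis and its
--           first child.
--
--     :Returns:
--         the primary axis of *id_axis*.
--
--     :Returns Type:
--         :class:`str`
--
--     :Examples:
--
--         >>> get_primary_axis('T1.0', 2)
--         'T3'
--         >>> get_primary_axis('T1.0.0', 2)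
--         'T5'
--         >>> get_primary_axis('T5', 2)
--         'T5'
--         >>> get_primary_axis('MS', 2)
--         'MS'
--
--     '''
--     if id_axis == 'MS':
--         primary_id_axis = id_axis
--     else:
--         id_axis = id_axis[1:]
--         while '.' in id_axis:
--             id_axis_split = id_axis.rsplit('.', 2)
--             last_pos = int(id_axis_split.pop())
--             last_but_one_pos = int(id_axis_split.pop())
--             new_last_pos = last_but_one_pos + last_pos + first_child_delay
--             id_axis = '.'.join(id_axis_split + [str(new_last_pos)])
--         primary_id_axis = 'T' + id_axis
--     return primary_id_axis
-- ===== SOURCE B (Python) =====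
-- def get_primary_axis(id_axis, first_child_delay):
--     if id_axis == 'MS':
--         return id_axis
--     rest = id_axis[1:]
--     if '.' not in rest:
--         return 'T' + rest
--     parts = [int(p) for p in rest.split('.')]
--     return 'T' + str(sum(parts) + (len(parts) - 1) * first_child_delay)
-- ===== Notes on version B (the rewrite author's own statement) =====
-- stated objective: simpler
-- what changed: Replaces the repeated rsplit/int/str/join folding while-loop with a single split, one int() per part and the closed-form sum(parts) + (len(parts)-1)*first_child_delay.
import Mathlib
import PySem

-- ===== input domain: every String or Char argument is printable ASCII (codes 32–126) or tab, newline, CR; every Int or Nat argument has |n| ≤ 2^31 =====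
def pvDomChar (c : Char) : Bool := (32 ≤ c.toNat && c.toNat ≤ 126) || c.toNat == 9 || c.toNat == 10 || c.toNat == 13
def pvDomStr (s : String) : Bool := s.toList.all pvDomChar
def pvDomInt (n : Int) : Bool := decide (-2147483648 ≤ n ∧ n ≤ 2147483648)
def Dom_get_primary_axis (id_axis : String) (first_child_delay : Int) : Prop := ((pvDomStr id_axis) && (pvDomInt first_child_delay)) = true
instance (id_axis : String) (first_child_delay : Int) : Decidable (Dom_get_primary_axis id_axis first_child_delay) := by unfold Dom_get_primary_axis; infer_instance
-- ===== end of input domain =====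

-- B replaces A's repeated rsplit/int/str/join folding loop by one split, one int() per
-- part and the closed-form sum(parts) + (len(parts)-1)*delay (objective: simpler).


-- ===== PORT A =====
-- id_axis.rsplit('.', 2), ported through the split-based characterisation of rsplit
-- with a single-character separator (the last two separators, counted from the right).
def pv_rsplit2 (s : List Char) : List (List Char) :=
  let ps := PySem.Chars.splitOn s ['.']
  if ps.length ≤ 3 then ps
  else PySem.Chars.join ['.'] (ps.take (ps.length - 2)) :: ps.drop (ps.length - 2)

-- the while-loop of A; fuel-based (fuel = length of the string + 1 at entry suffices,
-- every iteration removes one '.'); where Python raises ValueError (int() on a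
-- non-numeric piece) the loop stops — those inputs are excluded by Pre_ below.
def pv_loop (d : Int) : Nat → List Char → List Char
  | 0, s => s
  | f+1, s =>
    if PySem.Chars.isIn ['.'] s then
      match PySem.List.pop? (pv_rsplit2 s) with
      | none => s
      | some (last, rest1) =>
        match PySem.Int.ofChars? last with
        | none => s
        | some last_pos =>
          match PySem.List.pop? rest1 with
          | none => s
          | some (last_but_one, rest2) =>
            match PySem.Int.ofChars? last_but_one with
            | none => s
            | some last_but_one_pos =>
              pv_loop d f (PySem.Chars.join ['.']
                (rest2 ++ [PySem.Int.toChars (last_but_one_pos + last_pos + d)]))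
    else s

def get_primary_axis (id_axis : String) (first_child_delay : Int) : String :=
  if id_axis == "MS" then id_axis
  else
    let r := PySem.List.slice id_axis.toList (some 1) none
    String.ofList ('T' :: pv_loop first_child_delay (r.length + 1) r)

-- ===== PORT B =====
-- [int(p) for p in parts]: first failing int() raises ValueError, i.e. none here.
def pv_parseAll : List (List Char) → Option (List Int)
  | [] => some []
  | p :: t =>
    match PySem.Int.ofChars? p with
    | none => none
    | some v => (pv_parseAll t).map (v :: ·)

def get_primary_axis_alt (id_axis : String) (first_child_delay : Int) : String :=
  if id_axis == "MS" then id_axis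
  else
    let rest := PySem.List.slice id_axis.toList (some 1) none
    if PySem.Chars.isIn ['.'] rest then
      match pv_parseAll (PySem.Chars.splitOn rest ['.']) with
      | some parts =>
        String.ofList ('T' :: PySem.Int.toChars (parts.sum + ((parts.length : Int) - 1) * first_child_delay))
      | none => String.ofList ('T' :: rest)
    else String.ofList ('T' :: rest)

-- ===== PRECONDITION & SPEC =====
-- Pre_ excludes exactly the inputs on which Python A raises ValueError: id_axis other
-- than 'MS' whose tail id_axis[1:] contains a '.' and splits into pieces that are not
-- all valid int() literals.
def Pre_get_primary_axis (id_axis : String) (first_child_delay : Int) : Prop :=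
  id_axis = "MS" ∨
  PySem.Chars.isIn ['.'] (PySem.List.slice id_axis.toList (some 1) none) = false ∨
  (∀ p ∈ PySem.Chars.splitOn (PySem.List.slice id_axis.toList (some 1) none) ['.'],
      PySem.Int.ofChars? p ≠ none)
instance (id_axis : String) (first_child_delay : Int) : Decidable (Pre_get_primary_axis id_axis first_child_delay) := by unfold Pre_get_primary_axis; infer_instance

def pvWitness_get_primary_axis : String × Int := ("T1.0", 2)

def Spec_get_primary_axis (id_axis : String) (first_child_delay : Int) (out : String) : Prop := out = get_primary_axis_alt id_axis first_child_delay
instance (id_axis : String) (first_child_delay : Int) (out : String) : Decidable (Spec_get_primary_axis id_axis first_child_delay out) := by unfold Spec_get_primary_axis; infer_instance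

-- ===== CLAIM (what is proved, stated in full; the proofs are below) =====
def Claim_equal_get_primary_axis : Prop := ∀ (id_axis : String) (first_child_delay : Int), Dom_get_primary_axis id_axis first_child_delay → Pre_get_primary_axis id_axis first_child_delay → Spec_get_primary_axis id_axis first_child_delay (get_primary_axis id_axis first_child_delay)

-- ===== LEMMAS AND PROOFS =====
set_option maxRecDepth 8192

-- ---- Python int() round-trip: int(str(v)) = v -------------------------------------
def digitsChars : List Char := ['0','1','2','3','4','5','6','7','8','9']
def stepD (a : Nat) (c : Char) : Nat := a * 10 + (c.toNat - 48)

theorem pv_gen (g : List Char → Bool → Nat → Option Nat)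
    (hd : ∀ (c : Char) (rest : List Char) (b : Bool) (a : Nat), c ∈ digitsChars →
      g (c :: rest) b a = g rest true (stepD a c))
    (h0 : ∀ a, g [] true a = some a) :
    ∀ (ds : List Char) (a : Nat), (∀ c ∈ ds, c ∈ digitsChars) →
      g ds true a = some (ds.foldl stepD a) := by
  intro ds
  induction ds with
  | nil => intro a _; exact h0 a
  | cons c rest ih =>
    intro a hall
    rw [hd c rest true a (hall c List.mem_cons_self)]
    exact ih (stepD a c) (fun x hx => hall x (List.mem_cons_of_mem _ hx))

theorem pv_genInt (g : List Char → Bool → Nat → Option Nat)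
    (hd : ∀ (c : Char) (rest : List Char) (b : Bool) (a : Nat), c ∈ digitsChars →
      g (c :: rest) b a = g rest true (stepD a c))
    (h0 : ∀ a, g [] true a = some a) :
    ∀ (ds : List Char) (a : Nat), (∀ c ∈ ds, c ∈ digitsChars) →
      Option.map (fun n : Int => n) (do let x ← g ds true a; pure ((x : Nat) : Int))
        = some ((ds.foldl stepD a : Nat) : Int) := by
  intro ds a h
  rw [pv_gen g hd h0 ds a h]
  rfl

theorem pv_genNegInt (g : List Char → Bool → Nat → Option Nat)
    (hd : ∀ (c : Char) (rest : List Char) (b : Bool) (a : Nat), c ∈ digitsChars →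
      g (c :: rest) b a = g rest true (stepD a c))
    (h0 : ∀ a, g [] true a = some a) :
    ∀ (ds : List Char) (a : Nat), (∀ c ∈ ds, c ∈ digitsChars) →
      Option.map (fun n : Int => -n) (do let x ← g ds true a; pure ((x : Nat) : Int))
        = some (-((ds.foldl stepD a : Nat) : Int)) := by
  intro ds a h
  rw [pv_gen g hd h0 ds a h]
  rfl

theorem nospace_digits : ∀ c ∈ digitsChars, PySem.Int.isIntSpace c = false := by
  intro c hc; fin_cases hc <;> rfl

theorem dropWhile_self_of_nospace (l : List Char) (h : ∀ c ∈ l, PySem.Int.isIntSpace c = false) :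
    List.dropWhile PySem.Int.isIntSpace l = l := by
  cases hl : l with
  | nil => rfl
  | cons x t =>
    rw [List.dropWhile_cons]
    have : PySem.Int.isIntSpace x = false := by rw [hl] at h; exact h x List.mem_cons_self
    simp [this]

theorem ofChars?_digits (ds : List Char) (h : ∀ c ∈ ds, c ∈ digitsChars) (hne : ds ≠ []) :
    PySem.Int.ofChars? ds = some ((ds.foldl stepD 0 : Nat) : Int) := by
  rcases ds with _ | ⟨c, rest⟩
  · exact absurd rfl hne
  have hc := h c List.mem_cons_self
  have hstrip1 : List.dropWhile PySem.Int.isIntSpace (c :: rest) = c :: rest :=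
    dropWhile_self_of_nospace _ (fun x hx => nospace_digits x (h x hx))
  have hstrip2 : List.dropWhile PySem.Int.isIntSpace ((c :: rest).reverse) = (c :: rest).reverse :=
    dropWhile_self_of_nospace _ (fun x hx => nospace_digits x (h x (List.mem_reverse.mp hx)))
  fin_cases hc <;>
  · simp only [PySem.Int.ofChars?, hstrip1, hstrip2, List.reverse_reverse]
    split
    next heq => exact absurd heq (by simp)
    next heq => exact absurd heq (by simp)
    next =>
      apply pv_genInt
      · intro c' rest' b a hc'
        fin_cases hc' <;> rfl
      · intro a; rfl
      · intro x hx; exact h x (List.mem_cons_of_mem _ hx)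

theorem ofChars?_neg_digits (ds : List Char) (h : ∀ c ∈ ds, c ∈ digitsChars) (hne : ds ≠ []) :
    PySem.Int.ofChars? ('-' :: ds) = some (-((ds.foldl stepD 0 : Nat) : Int)) := by
  rcases ds with _ | ⟨c, rest⟩
  · exact absurd rfl hne
  have hc := h c List.mem_cons_self
  have hnos : ∀ x ∈ '-' :: c :: rest, PySem.Int.isIntSpace x = false := by
    intro x hx
    rcases List.mem_cons.mp hx with rfl | hx'
    · rfl
    · exact nospace_digits x (h x hx')
  have hstrip1 : List.dropWhile PySem.Int.isIntSpace ('-' :: c :: rest) = '-' :: c :: rest :=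
    dropWhile_self_of_nospace _ hnos
  have hstrip2 : List.dropWhile PySem.Int.isIntSpace (('-' :: c :: rest).reverse) = ('-' :: c :: rest).reverse :=
    dropWhile_self_of_nospace _ (fun x hx => hnos x (List.mem_reverse.mp hx))
  fin_cases hc <;>
  · simp only [PySem.Int.ofChars?, hstrip1, hstrip2, List.reverse_reverse]
    apply pv_genNegInt
    · intro c' rest' b a hc'
      fin_cases hc' <;> rfl
    · intro a; rfl
    · intro x hx; exact h x (List.mem_cons_of_mem _ hx)

theorem tdc_step (f n : Nat) (ds : List Char) :
    Nat.toDigitsCore 10 (f+1) n ds =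
      if n / 10 = 0 then (n % 10).digitChar :: ds
      else Nat.toDigitsCore 10 f (n/10) ((n % 10).digitChar :: ds) := rfl

theorem tdc_fuel : ∀ (n : Nat), ∀ (f : Nat) (ds : List Char), n < f →
    Nat.toDigitsCore 10 f n ds = Nat.toDigits 10 n ++ ds := by
  intro n
  induction n using Nat.strong_induction_on with
  | _ n ih =>
    intro f ds hf
    match f, hf with
    | f+1, hf =>
      rw [tdc_step]
      by_cases h0 : n / 10 = 0
      · rw [if_pos h0]
        show _ = Nat.toDigitsCore 10 (n+1) n [] ++ ds
        rw [tdc_step, if_pos h0]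
        rfl
      · rw [if_neg h0]
        have hlt : n / 10 < n := Nat.div_lt_self (by omega) (by omega)
        rw [ih (n/10) hlt f ((n % 10).digitChar :: ds) (by omega)]
        show _ = Nat.toDigitsCore 10 (n+1) n [] ++ ds
        rw [tdc_step, if_neg h0, ih (n/10) hlt n ([(n % 10).digitChar]) (by omega)]
        simp

theorem td_eq (n : Nat) : Nat.toDigits 10 n =
    if n / 10 = 0 then [(n % 10).digitChar]
    else Nat.toDigits 10 (n/10) ++ [(n % 10).digitChar] := by
  show Nat.toDigitsCore 10 (n+1) n [] = _
  rw [tdc_step]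
  by_cases h0 : n / 10 = 0
  · simp [h0]
  · rw [if_neg h0, if_neg h0,
      tdc_fuel (n/10) n [(n % 10).digitChar] (by omega)]

theorem digitChar_mem (m : Nat) (h : m < 10) : m.digitChar ∈ digitsChars := by
  interval_cases m <;> decide

theorem digitChar_val (m : Nat) (h : m < 10) : (m.digitChar).toNat - 48 = m := by
  interval_cases m <;> decide

theorem td_dig (n : Nat) : ∀ c ∈ Nat.toDigits 10 n, c ∈ digitsChars := by
  induction n using Nat.strong_induction_on with
  | _ n ih =>
    rw [td_eq]
    by_cases h0 : n / 10 = 0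
    · simp only [if_pos h0, List.mem_singleton]
      rintro c rfl; exact digitChar_mem _ (Nat.mod_lt _ (by omega))
    · simp only [if_neg h0, List.mem_append, List.mem_singleton]
      rintro c (hc | rfl)
      · exact ih (n/10) (Nat.div_lt_self (by omega) (by omega)) c hc
      · exact digitChar_mem _ (Nat.mod_lt _ (by omega))

theorem td_ne (n : Nat) : Nat.toDigits 10 n ≠ [] := by
  rw [td_eq]; split <;> simp

theorem td_val (n : Nat) : (Nat.toDigits 10 n).foldl stepD 0 = n := by
  induction n using Nat.strong_induction_on with
  | _ n ih =>
    rw [td_eq]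
    by_cases h0 : n / 10 = 0
    · simp only [if_pos h0, List.foldl_cons, List.foldl_nil]
      have : n % 10 = n := by omega
      rw [this]
      show 0 * 10 + (n.digitChar.toNat - 48) = n
      rw [digitChar_val n (by omega)]
      omega
    · rw [if_neg h0, List.foldl_append,
        ih (n/10) (Nat.div_lt_self (by omega) (by omega))]
      simp only [List.foldl_cons, List.foldl_nil]
      show n / 10 * 10 + ((n % 10).digitChar.toNat - 48) = n
      rw [digitChar_val _ (Nat.mod_lt _ (by omega))]
      omega

theorem ofChars?_toChars (n : Int) : PySem.Int.ofChars? (PySem.Int.toChars n) = some n := by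
  by_cases hn : n < 0
  · rw [PySem.Int.toChars, if_pos hn, ofChars?_neg_digits _ (td_dig _) (td_ne _), td_val]
    congr 1
    omega
  · rw [PySem.Int.toChars, if_neg hn, ofChars?_digits _ (td_dig _) (td_ne _), td_val]
    congr 1
    omega

theorem toChars_no_dot (n : Int) : '.' ∉ PySem.Int.toChars n := by
  rw [PySem.Int.toChars]
  have h1 : ∀ m : Nat, '.' ∉ Nat.toDigits 10 m := by
    intro m hm
    have := td_dig m '.' hm
    simp [digitsChars] at this
  split
  · intro hmem
    rcases List.mem_cons.mp hmem with h | h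
    · exact absurd h (by decide)
    · exact h1 _ h
  · exact h1 _

-- ---- splitOn bridge ----------------------------------------------------------------
theorem modifyHead_id' {α : Type} (l : List α) : List.modifyHead (fun x => x) l = l := by
  cases l <;> rfl

theorem go_inv : ∀ (l : List Char) (f : Nat) (cur : List Char) (acc : List (List Char)),
    l.length < f →
    PySem.Chars.splitOn.go ['.'] f l cur acc
      = acc.reverse ++ (List.splitOnP (· == '.') l).modifyHead (cur.reverse ++ ·) := by
  intro l
  induction l with
  | nil =>
    intro f cur acc hf
    match f, hf with
    | f+1, _ =>
      show (cur.reverse :: acc).reverse = _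
      simp [List.splitOnP_nil]
  | cons c rest ih =>
    intro f cur acc hf
    match f, hf with
    | f+1, hf =>
      show (if List.isPrefixOf ['.'] (c::rest) then
              PySem.Chars.splitOn.go ['.'] f (List.drop (['.'] : List Char).length (c::rest)) [] (cur.reverse :: acc)
            else PySem.Chars.splitOn.go ['.'] f rest (c :: cur) acc) = _
      have hpre : List.isPrefixOf ['.'] (c::rest) = (c == '.') := by
        simp [List.isPrefixOf, BEq.comm]
      rw [hpre]
      by_cases hc : c = '.'
      · subst hc
        rw [if_pos (by decide)]
        have : (['.'] : List Char).length = 1 := rfl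
        rw [this]
        show PySem.Chars.splitOn.go ['.'] f rest [] ((cur.reverse) :: acc) = _
        rw [ih f [] ((cur.reverse) :: acc) (by simpa using Nat.lt_of_succ_lt_succ hf)]
        rw [List.splitOnP_cons]
        simp [modifyHead_id']
      · rw [if_neg (by simp [hc])]
        rw [ih f (c :: cur) acc (by simpa using Nat.lt_of_succ_lt_succ hf)]
        rw [List.splitOnP_cons, if_neg (by simp [hc]), List.modifyHead_modifyHead]
        congr 1
        apply congrArg (fun g => List.modifyHead g _)
        funext x
        simp

theorem splitOn_bridge (s : List Char) :
    PySem.Chars.splitOn s ['.'] = List.splitOn '.' s := by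
  show PySem.Chars.splitOn.go ['.'] (s.length+1) s [] [] = _
  rw [go_inv s (s.length+1) [] [] (Nat.lt_succ_self _)]
  simp only [List.reverse_nil, List.nil_append, List.splitOn]
  exact modifyHead_id' _

theorem splitOnP_parts_false {α : Type} (pr : α → Bool) :
    ∀ (l : List α), ∀ x ∈ List.splitOnP pr l, ∀ c ∈ x, pr c = false := by
  intro l
  induction l with
  | nil =>
    intro x hx c hc
    rw [List.splitOnP_nil, List.mem_singleton] at hx
    subst hx; simp at hc
  | cons a t ih =>
    intro x hx c hc
    rw [List.splitOnP_cons] at hx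
    by_cases ha : pr a = true
    · rw [if_pos ha] at hx
      rcases List.mem_cons.mp hx with rfl | hx'
      · simp at hc
      · exact ih x hx' c hc
    · rw [if_neg ha] at hx
      rcases hsp : List.splitOnP pr t with _ | ⟨h1, tl⟩
      · exact absurd hsp (List.splitOnP_ne_nil pr t)
      · rw [hsp] at hx
        simp only [List.modifyHead] at hx
        rcases List.mem_cons.mp hx with rfl | hx'
        · rcases List.mem_cons.mp hc with rfl | hc'
          · simpa using ha
          · exact ih h1 (by rw [hsp]; exact List.mem_cons_self) c hc'
        · exact ih x (by rw [hsp]; exact List.mem_cons_of_mem _ hx') c hc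

theorem splitOnP_length {α : Type} (pr : α → Bool) :
    ∀ (l : List α), (List.splitOnP pr l).length = l.countP pr + 1 := by
  intro l
  induction l with
  | nil => simp [List.splitOnP_nil]
  | cons a t ih =>
    rw [List.splitOnP_cons, List.countP_cons]
    by_cases ha : pr a = true
    · simp [ha, ih]
    · simp only [ha, Bool.false_eq_true, if_false]
      simp [List.length_modifyHead, ih]

theorem mem_iff_two_le (s : List Char) :
    '.' ∈ s ↔ 2 ≤ (List.splitOn '.' s).length := by
  rw [List.splitOn, splitOnP_length]
  constructor
  · intro h
    have : 0 < s.countP (· == '.') := List.countP_pos_iff.mpr ⟨'.', h, by simp⟩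
    omega
  · intro h
    have : 0 < s.countP (· == '.') := by omega
    obtain ⟨a, ha, hpa⟩ := List.countP_pos_iff.mp this
    rw [show a = '.' from by simpa using hpa] at ha
    exact ha

theorem isIn_dot_iff (s : List Char) :
    PySem.Chars.isIn ['.'] s = true ↔ '.' ∈ s := by
  rw [PySem.Chars.isIn_iff_infix, List.singleton_infix_iff]

theorem pop_last {α : Type} (l : List α) (x : α) : PySem.List.pop? (l ++ [x]) = some (x, l) := by
  have h1 : PySem.List.pyIdx? (l ++ [x]).length (-1) = some l.length := by
    simp [PySem.List.pyIdx?]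
  simp only [PySem.List.pop?, h1, Option.bind_some]
  rw [List.getElem?_append_right (by simp)]
  simp [List.eraseIdx_append_of_length_le (le_refl _)]

-- ---- join lemmas -------------------------------------------------------------------
theorem join_snoc (q : List (List Char)) (hq : q ≠ []) (x : List Char) :
    PySem.Chars.join ['.'] (q ++ [x]) = PySem.Chars.join ['.'] q ++ '.' :: x := by
  induction q with
  | nil => exact absurd rfl hq
  | cons a t ih =>
    rcases t with _ | ⟨b, t'⟩
    · rw [show ([a] : List (List Char)) ++ [x] = [a, x] from rfl,
        PySem.Chars.join_cons_cons, PySem.Chars.join_singleton, PySem.Chars.join_singleton]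
      simp
    · rw [show ((a :: b :: t') : List (List Char)) ++ [x] = a :: ((b :: t') ++ [x]) from rfl]
      rw [show ((b :: t') : List (List Char)) ++ [x] = b :: (t' ++ [x]) from rfl]
      rw [PySem.Chars.join_cons_cons, PySem.Chars.join_cons_cons]
      rw [show (b :: (t' ++ [x])) = (b :: t') ++ [x] from rfl]
      rw [ih (by simp)]
      simp

-- ---- parseAll lemmas ---------------------------------------------------------------
theorem parseAll_append (l1 l2 : List (List Char)) (v1 v2 : List Int)
    (h1 : pv_parseAll l1 = some v1) (h2 : pv_parseAll l2 = some v2) :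
    pv_parseAll (l1 ++ l2) = some (v1 ++ v2) := by
  induction l1 generalizing v1 with
  | nil =>
    simp only [pv_parseAll] at h1
    cases h1
    simpa using h2
  | cons p t ih =>
    simp only [List.cons_append, pv_parseAll] at h1 ⊢
    rcases hp : PySem.Int.ofChars? p with _ | v
    · rw [hp] at h1; cases h1
    · rw [hp] at h1
      rcases ht : pv_parseAll t with _ | vt
      · rw [ht] at h1; cases h1
      · rw [ht] at h1
        simp only [Option.map_some] at h1
        cases h1
        rw [ih vt ht]
        simp

theorem parseAll_snoc2 (q : List (List Char)) (y z : List Char) (vs : List Int)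
    (h : pv_parseAll (q ++ [y, z]) = some vs) :
    ∃ qv vy vz, pv_parseAll q = some qv ∧ PySem.Int.ofChars? y = some vy ∧
      PySem.Int.ofChars? z = some vz ∧ vs = qv ++ [vy, vz] := by
  induction q generalizing vs with
  | nil =>
    simp only [List.nil_append, pv_parseAll] at h
    rcases hy : PySem.Int.ofChars? y with _ | vy
    · rw [hy] at h; cases h
    · rw [hy] at h
      rcases hz : PySem.Int.ofChars? z with _ | vz
      · rw [hz] at h; cases h
      · rw [hz] at h
        simp only [Option.map_some] at h
        cases h
        exact ⟨[], vy, vz, rfl, rfl, rfl, rfl⟩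
  | cons p t ih =>
    simp only [List.cons_append, pv_parseAll] at h ⊢
    rcases hp : PySem.Int.ofChars? p with _ | v
    · rw [hp] at h; cases h
    · rw [hp] at h
      rcases ht : pv_parseAll (t ++ [y, z]) with _ | vt
      · rw [ht] at h; cases h
      · rw [ht] at h
        simp only [Option.map_some] at h
        obtain ⟨qv, vy, vz, hq, hy, hz, rfl⟩ := ih vt ht
        rw [hq]
        exact ⟨v :: qv, vy, vz, by simp, hy, hz, by cases h; simp⟩

theorem parseAll_of_all (l : List (List Char)) (h : ∀ p ∈ l, PySem.Int.ofChars? p ≠ none) :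
    ∃ vs, pv_parseAll l = some vs ∧ vs.length = l.length := by
  induction l with
  | nil => exact ⟨[], rfl, rfl⟩
  | cons p t ih =>
    obtain ⟨vs, hvs, hlen⟩ := ih (fun x hx => h x (List.mem_cons_of_mem _ hx))
    rcases hp : PySem.Int.ofChars? p with _ | v
    · exact absurd hp (h p List.mem_cons_self)
    · exact ⟨v :: vs, by simp only [pv_parseAll, hp, hvs, Option.map_some], by simp [hlen]⟩

-- ---- the loop ----------------------------------------------------------------------
theorem loop_nodot (d : Int) (f : Nat) (s : List Char)
    (h : PySem.Chars.isIn ['.'] s = false) : pv_loop d f s = s := by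
  cases f with
  | zero => rfl
  | succ f => simp only [pv_loop, h, Bool.false_eq_true, if_false]

theorem pop1 {α : Type} (a : α) : PySem.List.pop? [a] = some (a, []) := by
  rw [show ([a] : List α) = [] ++ [a] from rfl, pop_last]

theorem pop2 {α : Type} (a b : α) : PySem.List.pop? [a, b] = some (b, [a]) := by
  rw [show ([a, b] : List α) = [a] ++ [b] from rfl, pop_last]

theorem pop3 {α : Type} (a b c : α) : PySem.List.pop? [a, b, c] = some (c, [a, b]) := by
  rw [show ([a, b, c] : List α) = [a, b] ++ [c] from rfl, pop_last]

theorem loop_eq (d : Int) : ∀ (k : Nat) (ps : List (List Char)) (vs : List Int) (f : Nat),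
    ps.length = k + 2 →
    pv_parseAll ps = some vs →
    (∀ p ∈ ps, '.' ∉ p) →
    ps.length ≤ f + 1 →
    pv_loop d f (PySem.Chars.join ['.'] ps)
      = PySem.Int.toChars (vs.sum + ((ps.length : Int) - 1) * d) := by
  intro k
  induction k with
  | zero =>
    intro ps vs f hlen hpa hdf hf
    obtain ⟨q, y, z, rfl⟩ : ∃ q y z, ps = q ++ [y, z] := by
      rcases List.eq_nil_or_concat ps with rfl | ⟨p1, z, rfl⟩
      · simp at hlen
      · rcases List.eq_nil_or_concat p1 with rfl | ⟨q, y, rfl⟩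
        · simp at hlen
        · exact ⟨q, y, z, by simp⟩
    have hq : q = [] := by
      have h2 := hlen; simp at h2; exact h2
    subst hq
    simp only [List.nil_append] at hpa hdf hf hlen ⊢
    obtain ⟨qv, vy, vz, hqv, hy, hz, rfl⟩ := parseAll_snoc2 [] y z vs hpa
    have hqv' : qv = [] := by simpa [pv_parseAll] using hqv.symm
    subst hqv'
    obtain ⟨f', rfl⟩ : ∃ f', f = f' + 1 := ⟨f - 1, by simp at hf; omega⟩
    have hdot : PySem.Chars.isIn ['.'] (PySem.Chars.join ['.'] [y, z]) = true := by
      rw [isIn_dot_iff, PySem.Chars.join_cons_cons, PySem.Chars.join_singleton]; simp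
    have hsplit : PySem.Chars.splitOn (PySem.Chars.join ['.'] [y, z]) ['.'] = [y, z] := by
      rw [splitOn_bridge]
      exact List.splitOn_intercalate [y, z] '.' (by
        intro l hl
        rcases List.mem_cons.mp hl with rfl | hl'
        · exact hdf l (by simp)
        · rcases List.mem_cons.mp hl' with rfl | h'
          · exact hdf l (by simp)
          · simp at h') (by simp)
    have hr2 : pv_rsplit2 (PySem.Chars.join ['.'] [y, z]) = [y, z] := by
      simp only [pv_rsplit2, hsplit]
      rfl
    simp only [pv_loop, hdot, if_true, hr2, pop2, pop1, hy, hz, List.nil_append]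
    rw [show PySem.Chars.join ['.'] [PySem.Int.toChars (vy + vz + d)]
          = PySem.Int.toChars (vy + vz + d) from by
        rw [PySem.Chars.join_singleton]]
    rw [loop_nodot d f' _ (by
      rw [← Bool.not_eq_true, isIn_dot_iff]
      exact toChars_no_dot _)]
    congr 1
    simp
  | succ k ih =>
    intro ps vs f hlen hpa hdf hf
    obtain ⟨q, y, z, rfl⟩ : ∃ q y z, ps = q ++ [y, z] := by
      rcases List.eq_nil_or_concat ps with rfl | ⟨p1, z, rfl⟩
      · simp at hlen
      · rcases List.eq_nil_or_concat p1 with rfl | ⟨q, y, rfl⟩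
        · simp at hlen
        · exact ⟨q, y, z, by simp⟩
    have hqlen : q.length = k + 1 := by
      have := hlen; simp at this; omega
    have hqne : q ≠ [] := by
      intro hq; rw [hq] at hqlen; simp at hqlen
    obtain ⟨qv, vy, vz, hqv, hy, hz, rfl⟩ := parseAll_snoc2 q y z vs hpa
    obtain ⟨f', rfl⟩ : ∃ f', f = f' + 1 := ⟨f - 1, by have h := hf; simp at h; omega⟩
    have hdot : PySem.Chars.isIn ['.'] (PySem.Chars.join ['.'] (q ++ [y, z])) = true := by
      rw [isIn_dot_iff,
        show (q ++ [y, z] : List (List Char)) = (q ++ [y]) ++ [z] from by simp,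
        join_snoc _ (by simp)]
      simp
    have hsplit : PySem.Chars.splitOn (PySem.Chars.join ['.'] (q ++ [y, z])) ['.'] = q ++ [y, z] := by
      rw [splitOn_bridge]
      exact List.splitOn_intercalate _ '.' (fun l hl => hdf l hl) (by simp)
    have hparse1 : pv_parseAll [PySem.Int.toChars (vy + vz + d)] = some [vy + vz + d] := by
      simp [pv_parseAll, ofChars?_toChars]
    have hpa' : pv_parseAll (q ++ [PySem.Int.toChars (vy + vz + d)]) = some (qv ++ [vy + vz + d]) :=
      parseAll_append q _ qv _ hqv hparse1
    have hdf' : ∀ p ∈ q ++ [PySem.Int.toChars (vy + vz + d)], '.' ∉ p := by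
      intro p hp
      rcases List.mem_append.mp hp with hp' | hp'
      · exact hdf p (List.mem_append_left _ hp')
      · rw [List.mem_singleton] at hp'
        subst hp'
        exact toChars_no_dot _
    have hrec : pv_loop d f' (PySem.Chars.join ['.'] (q ++ [PySem.Int.toChars (vy + vz + d)]))
        = PySem.Int.toChars ((qv ++ [vy + vz + d]).sum
            + (((q ++ [PySem.Int.toChars (vy + vz + d)]).length : Int) - 1) * d) := by
      apply ih (q ++ [PySem.Int.toChars (vy + vz + d)]) (qv ++ [vy + vz + d]) f' (by simp [hqlen]) hpa' hdf'
      simp at hf ⊢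
      omega
    have hsum : PySem.Int.toChars ((qv ++ [vy + vz + d]).sum
            + (((q ++ [PySem.Int.toChars (vy + vz + d)]).length : Int) - 1) * d)
        = PySem.Int.toChars ((qv ++ [vy, vz]).sum + (((q ++ [y, z]).length : Int) - 1) * d) := by
      congr 1
      simp
      ring
    by_cases hk : k = 0
    · subst hk
      obtain ⟨q0, rfl⟩ : ∃ a, q = [a] := by
        rcases q with _ | ⟨a, t⟩
        · simp at hqlen
        · rcases t with _ | _
          · exact ⟨a, rfl⟩
          · simp at hqlen
      have hr2 : pv_rsplit2 (PySem.Chars.join ['.'] ([q0] ++ [y, z])) = [q0, y, z] := by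
        simp only [pv_rsplit2, hsplit]
        rfl
      simp only [pv_loop, hdot, if_true, hr2, pop3, pop2, hy, hz]
      rw [hrec, hsum]
    · have hr2 : pv_rsplit2 (PySem.Chars.join ['.'] (q ++ [y, z]))
          = [PySem.Chars.join ['.'] (List.take ((q ++ [y, z]).length - 2) (q ++ [y, z])), y, z] := by
        simp only [pv_rsplit2, hsplit]
        rw [if_neg (by simp; omega)]
        have h1 : (q ++ [y, z]).length - 2 = q.length := by simp
        rw [show List.drop ((q ++ [y, z]).length - 2) (q ++ [y, z])
              = [y, z] from by rw [h1, List.drop_left]]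
      have htake : List.take ((q ++ [y, z]).length - 2) (q ++ [y, z]) = q := by
        rw [show (q ++ [y, z]).length - 2 = q.length from by simp, List.take_left]
      rw [htake] at hr2
      simp only [pv_loop, hdot, if_true, hr2, pop3, pop2, hy, hz]
      have hjoin : PySem.Chars.join ['.'] ([PySem.Chars.join ['.'] q] ++ [PySem.Int.toChars (vy + vz + d)])
          = PySem.Chars.join ['.'] (q ++ [PySem.Int.toChars (vy + vz + d)]) := by
        rw [join_snoc q hqne,
          show ([PySem.Chars.join ['.'] q] ++ [PySem.Int.toChars (vy + vz + d)] : List (List Char))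
              = [PySem.Chars.join ['.'] q, PySem.Int.toChars (vy + vz + d)] from rfl,
          PySem.Chars.join_cons_cons, PySem.Chars.join_singleton]
        simp
      rw [hjoin, hrec, hsum]

-- ===== VERDICT (by name: the statement is the Claim_ definition above) =====
theorem fuel_bound (r : List Char) :
    (PySem.Chars.splitOn r ['.']).length ≤ r.length + 1 := by
  rw [splitOn_bridge, List.splitOn, splitOnP_length]
  have := List.countP_le_length (p := fun x => x == '.') (l := r)
  omega

theorem get_primary_axis_spec : Claim_equal_get_primary_axis := by
  intro id_axis d _ hpre
  unfold Spec_get_primary_axis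
  cases hbeq : (id_axis == "MS") with
  | true => simp only [get_primary_axis, get_primary_axis_alt, hbeq, if_true]
  | false =>
    simp only [get_primary_axis, get_primary_axis_alt, hbeq, Bool.false_eq_true, if_false]
    cases hdot : PySem.Chars.isIn ['.'] (PySem.List.slice id_axis.toList (some 1) none) with
    | false =>
      rw [loop_nodot d _ _ hdot]
      simp
    | true =>
      rcases hpre with h1 | h2 | h3
      · subst h1; simp at hbeq
      · rw [h2] at hdot; cases hdot
      · obtain ⟨vs, hvs, hlen⟩ := parseAll_of_all _ h3
        have hps2 : 2 ≤ (PySem.Chars.splitOn (PySem.List.slice id_axis.toList (some 1) none) ['.']).length := by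
          rw [splitOn_bridge]
          exact (mem_iff_two_le _).mp ((isIn_dot_iff _).mp hdot)
        have hdf : ∀ p ∈ PySem.Chars.splitOn (PySem.List.slice id_axis.toList (some 1) none) ['.'], '.' ∉ p := by
          rw [splitOn_bridge]
          intro p hp hc
          have := splitOnP_parts_false (· == '.') _ p hp '.' hc
          simp at this
        have hjoin : PySem.Chars.join ['.'] (PySem.Chars.splitOn (PySem.List.slice id_axis.toList (some 1) none) ['.'])
            = PySem.List.slice id_axis.toList (some 1) none := by
          rw [splitOn_bridge]
          exact List.intercalate_splitOn _ '.'
        set n := (PySem.List.slice id_axis.toList (some 1) none).length + 1 with hn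
        have hA : pv_loop d n
              (PySem.List.slice id_axis.toList (some 1) none)
            = PySem.Int.toChars (vs.sum
                + (((PySem.Chars.splitOn (PySem.List.slice id_axis.toList (some 1) none) ['.']).length : Int) - 1) * d) := by
          conv_lhs => rw [← hjoin]
          apply loop_eq d ((PySem.Chars.splitOn (PySem.List.slice id_axis.toList (some 1) none) ['.']).length - 2)
            _ vs _ (by omega) hvs hdf
          have := fuel_bound (PySem.List.slice id_axis.toList (some 1) none)
          omega
        rw [hA, hvs]
        show String.ofList ('T' :: PySem.Int.toChars (vs.sum
            + (((PySem.Chars.splitOn (PySem.List.slice id_axis.toList (some 1) none) ['.']).length : Int) - 1) * d))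
          = String.ofList ('T' :: PySem.Int.toChars (vs.sum + ((vs.length : Int) - 1) * d))
        rw [hlen]
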